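/- GENERATED by mk_final_copies.py from the proof of the farm's unit `start_decoder.C5e` (farm:start_decoder.C5e.1: Proof.lean) as the
   re-elaboration sweep compiled it — do not edit. -/
import Asan.CheckWalk
import Vorbis.Spec.Reader
import Vorbis.Spec.StartDecoderC4
import Vorbis.Spec.Units.start_decoder_C5e

open X86 X86.User Asan Vorbis Vorbis.Spec Vorbis.Spec.StartDecoder

set_option maxRecDepth 4000
set_option maxHeartbeats 4000000

namespace Vorbis.Spec.start_decoder_C5e

/-- The test of line 3819 as the code does it (`movzx eax, BYTE ; sub eax, 0BH ; cmp al, 0F3H ; ja`): the low byte of `b − 11` is at most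
243 exactly when `11 ≤ b ≤ 254`. By enumeration of the 256 bytes. -/
theorem c5e_long_test : ∀ x : Fin 256,
    ((BitVec.setWidth 8 (BitVec.zeroExtend 32 (BitVec.ofNat 8 x.val) - 11#32)).toNat ≤ 243 ↔ (11 ≤ x.val ∧ x.val ≤ 254)) := by
  decide

/-- `c5e_long_test` for a natural number below 256. -/
theorem c5e_long_nat (b : Nat) (hb : b < 256) :
    ((BitVec.setWidth 8 (BitVec.zeroExtend 32 (BitVec.ofNat 8 b) - 11#32)).toNat ≤ 243 ↔ (11 ≤ b ∧ b ≤ 254)) :=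
  c5e_long_test ⟨b, hb⟩

/-- **Segment C5e of `start_decoder`** (`loop10` 0x11484a, ONE ROUND of loop 3818): the checked load of `c->entries`; `E ≤ j`: the exit
`AtC6` (`C5.out5L`); else the checked load of `lengths[j]` (`C4.lengths_site`), the test `11 ≤ b ≤ 254`
(`sub eax,0BH ; cmp al,0F3H ; ja`), `++sorted_count` or not, `++j`: `In5L` at the head again (`C5.carry5L`). -/
theorem segC5e_walk {Lay : Layout} (hLay : Lay.hi = 0x1000000) {μ : Microarch} (hμ : UserX.MicroOK μ) {u₀ : State}
    (hcode : HasCodeNat Lay u₀ Vorbis.L.start_decoder.entry Vorbis.Code.code_start_decoder.nat Vorbis.L.start_decoder.size)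
    (hld1 : Asan.SmallCheck Lay μ Vorbis.WayInv (Vorbis.CodeOK u₀) [.rax, .rdx] 1 Vorbis.L.__asan_load1_noabort.entry)
    (hld4 : Asan.SmallCheck Lay μ Vorbis.WayInv (Vorbis.CodeOK u₀) [.rax, .rcx, .rdx] 4 Vorbis.L.__asan_load4_noabort.entry)
    {g : Ghost} {i : Nat} {A2 A3 Ai : Arena} {A : Arena × List Obj} {lengths : Nat} {e : Int} {j : Nat} {v : State}
    (hat : In5L u₀ g i A2 A3 Ai A lengths e j v) :
    ReachVia Lay μ WayInv v (fun w => AtC6 u₀ g i w ∨ At5L u₀ g i e (j + 1) w) := by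
  have hfr := hat.frame
  have he := hfr.entry
  v_entry he
  simp only [depth] at he_room he_stack
  have w_rip := hfr.rip
  obtain ⟨hr1, hr2⟩ := hfr.r_eq
  simp only [steady] at hr1
  have hRA : g.RA = (g.e.reg .rsp).toNat := rfl
  have c_rsp : v.reg .rsp = g.e.reg .rsp - 1480 := by
    rw [hfr.rsp]
    refine (eq_addr _ _ ?_).symm
    unfold Ghost.R Ghost.RA steady
    u_omega
  -- the struct `c = cb(i)`: inside the codebooks block, a setup block of the arena
  have ha := hat.cur.sd.arena
  have hcb := hat.cur.ages.cbOK
  have hBA : A.1.Blk (codebooksBlock v.mem g.f) := hcb.F2.mono hat.cur.ages.exti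
  have hcin := hcb.cb_in i hat.cur.lt
  have hboff := ha.block_off hBA
  have hbin := arena_inside ha hBA
  have hbnd := ha.bounds
  simp only [vblock, Off.sizeof.Codebook] at hcin hboff hbin
  have hcdef : stb_vorbis.codebooks_at v.mem g.f i = g.cb v.mem i := rfl
  rw [hcdef] at hcin
  have c_r14n : (v.reg .r14).toNat = g.cb v.mem i := by
    rw [hat.cur.r14]
    exact toNat_addr _ (by omega)
  have hBA' : A.1.Block (stb_vorbis.codebooks v.mem g.f) (2120 * (stb_vorbis.codebook_count v.mem g.f).toNat) := hBA
  have e4 : v.reg .r14 + 4 = addr (g.cb v.mem i + 4) := by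
    rw [hat.cur.r14]
    exact Vorbis.addr_add_lit _ 4
  have t4 : (v.reg .r14 + 4).toNat = g.cb v.mem i + 4 := by
    rw [e4]
    exact toNat_addr _ (by omega)
  have hent : (BitVec.ofNat 32 (v.mem.readLE (v.reg .r14 + 4) 4)).toInt = Codebook.entries v.mem (g.cb v.mem i) := by
    rw [e4]
    exact Mem.toInt_ofNat32_u32 v.mem _
  have hjle := hat.j_le
  have hnn := hat.k1.ent_nonneg
  have hj31 : j < 2 ^ 31 := by
    have := hat.k1.ent_lt
    omega
  have hjint : (Word.part .w32 (UInt64.ofNat j)).toInt = (j : Int) := Vorbis.Spec.cnt32_part_toInt j hj31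
  have hcnt := longCount_le v.mem lengths j
  have hout := hat.cur.hand.objOut
  simp only [voff] at hout
  have t1 : (g.e.reg .rsp - 1488).toNat = (g.e.reg .rsp).toNat - 1488 := by u_omega
  have c_r12 : v.reg .r12 = UInt64.ofNat j := hat.r12
  have c_rbx := hat.rbx
  have c_rbp : v.reg .rbp = UInt64.ofNat (longCount v.mem lengths j) := hat.rbp
  have hst := C4.obj_stack hfr hat.cur.hand
  obtain ⟨lw1, lw2, lw3, lw4⟩ := C4.lengths_where hat.cur.sd.arena (fun B hB => hB.1) hat.place
  have htx := hat.cur.hand.arenaText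
  simp only [Vorbis.L.textHi] at htx
  have hbw : UInt64.ofNat j + addr lengths = addr (lengths + j) := by
    rw [UInt64.add_comm]
    exact addr_add lengths j
  have hbn : (addr (lengths + j)).toNat = lengths + j := toNat_addr _ (by omega)
  have w_eq : Mem.EqOn Vorbis.L.textLo Vorbis.L.textHi u₀.mem v.mem := hfr.code
  have hdf : v.flags .df = false := (show abiInv _ from hfr.inv).1
  have hmx : v.mxcsr &&& 0x1F80 = 0x1F80 := (show abiInv _ from hfr.inv).2
  have hsse := Vorbis.sseOK_of_abiInv hfr.inv
  u_walk hcode [hμ.vendor, Vorbis.Spec.cnt32_sext j hj31, Vorbis.Spec.cnt32_succ j (by omega),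
      Vorbis.Spec.cnt32_succ (longCount v.mem lengths j) (by omega)]
    until [Vorbis.L.start_decoder.cut113, Vorbis.L.start_decoder.loop10] span [Vorbis.L.textLo, Vorbis.L.textHi] side (v_side)
  case check_11484e =>
    have hun : ShadowUntouched v.mem s_11484e.mem := by v_untouched
    have hsh' := hfr.shadow.untouched hun
    refine ⟨hsh'.sealed, ?_⟩
    rw [t4]
    exact ha.block_acc_inv hsh' hBA' (by omega) (by omega) (by decide)
  case check_114866 =>
    have hun : ShadowUntouched v.mem s_114866.mem := by v_untouched
    rw [hent, hjint] at hbr_114857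
    have hjE : j < (Codebook.entries v.mem (g.cb v.mem i)).toNat := by omega
    rw [hbw]
    exact C4.lengths_site hat.cur.sd.arena hfr.shadow hun (fun B hB => hB.1) hat.place hjE hbn
  · -- `E ≤ j`: the loop is over, `AtC6`
    rw [hent, hjint] at hbr_114857
    have hjE : j = (Codebook.entries v.mem (g.cb v.mem i)).toNat := by omega
    have hsame : Mem.SameExcept [⟨g.R - 408, g.R⟩] v.mem s_114857.mem := by
      rw [w_mem]
      refine Mem.SameExcept.writeLE _ v.mem _ 8 _ ?_ ⟨⟨g.R - 408, g.R⟩, List.mem_cons_self, ?_, ?_⟩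
      · rw [t1]
        omega
      · rw [t1]
        show g.R - 408 ≤ _
        omega
      · rw [t1]
        show _ ≤ g.R
        omega
    have hq : ∀ x, x ∈ [(⟨g.R - 408, g.R⟩ : Span)] → C5.QuietWin5 g x := by
      intro x hx
      rw [List.mem_singleton.mp hx]
      exact ⟨Nat.le_refl _, Nat.le_refl _⟩
    have hun : ShadowUntouched v.mem s_114857.mem := by v_untouched
    have habi : abiInv s_114857 := by
      refine Vorbis.abiInv_of ?_ ?_
      · rw [w_flags]
        simp only [X86.User.df_setStatus]
        exact w_df_11484e
      · rw [w_mxcsr]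
        exact hmx
    have hrsp : s_114857.reg .rsp = v.reg .rsp := by
      rw [w_rsp, c_rsp]
    exact ReachVia.done (Or.inl (C5.out5L hat hsame hun hq w_rip hrsp w_eq habi (w_kept .r14 rfl) (w_kept .r13 rfl)
      (w_kept .rbx rfl) (w_kept .rbp rfl) hjE))
  · -- `lengths[j]` is not counted: `++j`
    rw [hent, hjint] at hbr_114857
    rw [hbw] at hbr_114874
    have hb256 : v.mem.readLE (addr (lengths + j)) 1 < 256 := Mem.readLE_lt' v.mem _ 1
    have hu8 : v.mem.readLE (addr (lengths + j)) 1 = v.mem.u8 (lengths + j) := rfl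
    have hshort : ¬ (11 ≤ v.mem.u8 (lengths + j) ∧ v.mem.u8 (lengths + j) ≤ 254) := by
      intro hc
      have k := (c5e_long_nat _ hb256).mpr hc
      omega
    have hsame : Mem.SameExcept [⟨g.R - 408, g.R⟩] v.mem s_114846.mem := by
      rw [w_mem]
      refine Mem.SameExcept.writeLE _ v.mem _ 8 _ ?_ ⟨⟨g.R - 408, g.R⟩, List.mem_cons_self, ?_, ?_⟩
      · rw [t1]
        omega
      · rw [t1]
        show g.R - 408 ≤ _
        omega
      · rw [t1]
        show _ ≤ g.R
        omega
    have hq : ∀ x, x ∈ [(⟨g.R - 408, g.R⟩ : Span)] → C5.QuietWin5 g x := by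
      intro x hx
      rw [List.mem_singleton.mp hx]
      exact ⟨Nat.le_refl _, Nat.le_refl _⟩
    have hun : ShadowUntouched v.mem s_114846.mem := by v_untouched
    have habi : abiInv s_114846 := by
      refine Vorbis.abiInv_of ?_ ?_
      · rw [w_flags]
        simp only [X86.User.df_setStatus]
        exact w_df_114866
      · rw [w_mxcsr]
        exact hmx
    have hrsp : s_114846.reg .rsp = v.reg .rsp := by
      rw [w_rsp, c_rsp]
    have hrbp : s_114846.reg .rbp = addr (longCount v.mem lengths (j + 1)) := by
      rw [longCount_succ_short hshort]
      exact (w_kept .rbp rfl).trans c_rbp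
    have hL := C5.carry5L (j' := j + 1) hat hsame hun hq w_rip hrsp w_eq habi (w_kept .r14 rfl) (w_kept .r13 rfl)
      (w_kept .rbx rfl) w_r12 (by omega) hrbp
    exact ReachVia.done (Or.inr ⟨A, lengths, A2, A3, Ai, hL⟩)
  · -- `lengths[j]` is counted: `++sorted_count`, `++j`
    rw [hent, hjint] at hbr_114857
    rw [hbw] at hbr_114874
    have hb256 : v.mem.readLE (addr (lengths + j)) 1 < 256 := Mem.readLE_lt' v.mem _ 1
    have hu8 : v.mem.readLE (addr (lengths + j)) 1 = v.mem.u8 (lengths + j) := rfl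
    have hlong : 11 ≤ v.mem.u8 (lengths + j) ∧ v.mem.u8 (lengths + j) ≤ 254 := by
      exact (c5e_long_nat _ hb256).mp hbr_114874
    have hsame : Mem.SameExcept [⟨g.R - 408, g.R⟩] v.mem s_114846.mem := by
      rw [w_mem]
      refine Mem.SameExcept.writeLE _ v.mem _ 8 _ ?_ ⟨⟨g.R - 408, g.R⟩, List.mem_cons_self, ?_, ?_⟩
      · rw [t1]
        omega
      · rw [t1]
        show g.R - 408 ≤ _
        omega
      · rw [t1]
        show _ ≤ g.R
        omega
    have hq : ∀ x, x ∈ [(⟨g.R - 408, g.R⟩ : Span)] → C5.QuietWin5 g x := by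
      intro x hx
      rw [List.mem_singleton.mp hx]
      exact ⟨Nat.le_refl _, Nat.le_refl _⟩
    have hun : ShadowUntouched v.mem s_114846.mem := by v_untouched
    have habi : abiInv s_114846 := by
      refine Vorbis.abiInv_of ?_ ?_
      · rw [w_flags]
        simp only [X86.User.df_setStatus]
        exact w_df_114866
      · rw [w_mxcsr]
        exact hmx
    have hrsp : s_114846.reg .rsp = v.reg .rsp := by
      rw [w_rsp, c_rsp]
    have hrbp : s_114846.reg .rbp = addr (longCount v.mem lengths (j + 1)) := by
      rw [longCount_succ_long hlong]
      exact w_rbp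
    have hL := C5.carry5L (j' := j + 1) hat hsame hun hq w_rip hrsp w_eq habi (w_kept .r14 rfl) (w_kept .r13 rfl)
      (w_kept .rbx rfl) w_r12 (by omega) hrbp
    exact ReachVia.done (Or.inr ⟨A, lengths, A2, A3, Ai, hL⟩)

end Vorbis.Spec.start_decoder_C5e

/-- The unit `start_decoder.C5e`: `segC5e_walk` at every entry state. -/
theorem Vorbis.Spec.Worked.start_decoder_C5e_ok : Vorbis.Spec.start_decoder_C5e.Statement := by
  intro Lay hLay μ hμ u₀ hcode hld1 hld4 g i e j v hat
  obtain ⟨A, lengths, A2, A3, Ai, h⟩ := hat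
  exact Vorbis.Spec.start_decoder_C5e.segC5e_walk hLay hμ hcode hld1 hld4 h
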